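-- pv_equiv track=rewrite | github.com/kiung22/algorithm-problem-solving | Programmers/challenge/pro4.py | solution
-- ===== SOURCE A (Python) =====
-- def solution(n, z, roads, queries):
--     w_dict = {}
--     for road in roads:
--         w_dict[road[2]] = (road[0], road[1])
--
--     location = [0]
--     dp = [0]
--     ans = []
--
--     for c in queries:
--         while c >= len(dp):
--             n = len(dp)
--             if n % z == 0:
--                 dp.append(n//z)
--                 location.append(0)
--             else:
--                 max_value = 10000000000
--                 min_value = max_value
--                 min_location = 0
--                 for w in w_dict.keys():
--                     if 0 <= n-w and dp[n-w] != -1: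
--                         value = dp[n-w] + 1 + (w_dict[w][0] != location[n-w])
--                         if value < min_value:
--                             min_value = value
--                             min_location = w_dict[w][1]
--                 if min_value == max_value:
--                     dp.append(-1)
--                     location.append(0)
--                 else:
--                     dp.append(min_value)
--                     location.append(min_location)
--
--         ans.append(dp[c])
--
--     return ans
-- ===== SOURCE B (Python) =====
-- def solution(n, z, roads, queries):
--     w_dict = {}
--     for road in roads:
--         w_dict[road[2]] = (road[0], road[1])
--     weights = list(w_dict.keys())
--
--     # demand-driven: discover only the states actually needed, then evaluate them sparsely
--     needed = set(c for c in queries if c >= 0)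
--     m = max(needed, default=0)
--     for k in range(m, 0, -1):
--         if k in needed and k % z != 0:
--             for w in weights:
--                 if 0 <= k - w:
--                     needed.add(k - w)
--
--     memo = {0: (0, 0)}
--     for k in sorted(needed):
--         if k == 0:
--             continue
--         if k % z == 0:
--             memo[k] = (k // z, 0)
--         else:
--             best = None
--             for w in weights:
--                 if 0 <= k - w:
--                     pc, pl = memo[k - w]
--                     if pc != -1:
--                         v = pc + 1 + (w_dict[w][0] != pl)
--                         if best is None or v < best[0]:
--                             best = (v, w_dict[w][1])
--             memo[k] = best if best is not None else (-1, 0)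
--
--     return [memo.get(c, (-1, 0))[0] for c in queries]
-- ===== Notes on version B (the rewrite author's own statement) =====
-- stated objective: alternative
-- what changed: B replaces A's lazy dense table that grows one state at a time interleaved with the queries by a demand-driven scheme: a descending discovery pass collects into a set exactly the states the queries need, a second pass evaluates only those states in ascending sorted order into a memo dict, and answers are dict lookups.
-- intended difference: On inputs containing a negative query A returns the value of dp[c] by Python negative-index wraparound into the partially grown dp list (so the answer depends on the other queries), while B treats a negative transform count as unreachable and returns -1, the intended value for a state that does not exist. — e.g. on solution(0, 2, [], [-1]): A returns [0], B returns [-1]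
import Mathlib
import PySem

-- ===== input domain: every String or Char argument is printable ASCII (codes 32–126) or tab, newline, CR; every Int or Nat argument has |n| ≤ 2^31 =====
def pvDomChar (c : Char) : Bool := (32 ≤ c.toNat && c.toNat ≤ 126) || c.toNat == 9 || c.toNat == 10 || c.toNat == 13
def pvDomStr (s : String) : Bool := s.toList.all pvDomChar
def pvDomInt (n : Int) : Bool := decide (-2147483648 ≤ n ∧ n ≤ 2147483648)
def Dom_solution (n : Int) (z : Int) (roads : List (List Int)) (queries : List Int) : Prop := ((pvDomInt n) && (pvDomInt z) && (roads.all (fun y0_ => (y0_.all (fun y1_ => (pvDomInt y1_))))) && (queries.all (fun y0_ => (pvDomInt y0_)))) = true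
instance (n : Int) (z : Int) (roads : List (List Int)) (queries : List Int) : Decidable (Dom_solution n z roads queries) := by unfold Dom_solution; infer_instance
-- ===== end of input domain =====

-- B replaces A's lazily grown dense dp/location lists by a demand-driven scheme: discover
-- the needed states into a set, evaluate them sparsely in sorted order into a memo dict;
-- objective: alternative (no speed claim). On negative queries A's wraparound value is
-- replaced by -1 (see D_solution below).

-- ===== PORT A =====
-- w_dict = {road[2]: (road[0], road[1]) for road in roads} (shared helper: both Pythons
-- build it with the identical loop)
def mkWDict (roads : List (List Int)) : PySem.Dict Int (Int × Int) :=
  roads.foldl (fun d road =>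
    d.insert (PySem.List.pyGetD road 2 0)
      (PySem.List.pyGetD road 0 0, PySem.List.pyGetD road 1 0)) PySem.Dict.empty

-- the inner 'for w in w_dict.keys()' scan of A, accumulator (min_value, min_location)
def solnScanA (wd : PySem.Dict Int (Int × Int)) (dp loc : List Int) (n : Int) : Int × Int :=
  wd.keys.foldl (fun acc w =>
    if 0 ≤ n - w ∧ PySem.List.pyGetD dp (n - w) 0 ≠ -1 then
      let value : Int := PySem.List.pyGetD dp (n - w) 0 + 1 +
        (if (wd.getD w (0, 0)).1 ≠ PySem.List.pyGetD loc (n - w) 0 then 1 else 0)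
      if value < acc.1 then (value, (wd.getD w (0, 0)).2) else acc
    else acc) (10000000000, 0)

-- the 'while c >= len(dp)' extension loop of A (the reassigned n is len(dp)); each pass
-- grows dp by exactly one, so the loop runs exactly (c + 1 - len(dp)).toNat times — the
-- fuel below only counts those passes (the `len(dp) ≤ c` test is still A's loop test)
def solnExtendAGo (z c : Int) (wd : PySem.Dict Int (Int × Int)) :
    Nat → List Int → List Int → List Int × List Int
  | 0, dp, loc => (dp, loc)
  | fuel + 1, dp, loc =>
    if ((dp.length : Int) ≤ c) then
      let n : Int := dp.length
      if PySem.Int.mod n z = 0 then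
        solnExtendAGo z c wd fuel (dp ++ [PySem.Int.floordiv n z]) (loc ++ [0])
      else
        let s := solnScanA wd dp loc n
        if s.1 = 10000000000 then
          solnExtendAGo z c wd fuel (dp ++ [-1]) (loc ++ [0])
        else
          solnExtendAGo z c wd fuel (dp ++ [s.1]) (loc ++ [s.2])
    else (dp, loc)

def solnExtendA (z c : Int) (wd : PySem.Dict Int (Int × Int)) (dp loc : List Int) :
    List Int × List Int :=
  solnExtendAGo z c wd (c + 1 - dp.length).toNat dp loc

def solution (n : Int) (z : Int) (roads : List (List Int)) (queries : List Int) : List Int :=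
  let wd := mkWDict roads
  (queries.foldl (fun (st : List Int × List Int × List Int) c =>
      let r := solnExtendA z c wd st.1 st.2.1
      (r.1, r.2, st.2.2 ++ [PySem.List.pyGetD r.1 c 0])) ([0], [0], [])).2.2

-- ===== PORT B =====
-- one step of B's descending discovery loop: if state k is needed and not a multiple of z,
-- mark every predecessor state k - w as needed
def bClosure (z : Int) (weights : List Int) (nd : PySem.Set Int) (k : Int) : PySem.Set Int :=
  if nd.contains k ∧ PySem.Int.mod k z ≠ 0 then
    weights.foldl (fun nd2 w => if 0 ≤ k - w then PySem.Set.add nd2 (k - w) else nd2) nd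
  else nd

-- one step of B's ascending evaluation loop over the sorted needed states
-- (Python reads memo[k - w]: present for every admitted input; a missing key would raise
-- in Python — such inputs are outside Pre_ — while the port's getD returns the default)
def bEval (z : Int) (wd : PySem.Dict Int (Int × Int)) (weights : List Int)
    (memo : PySem.Dict Int (Int × Int)) (k : Int) : PySem.Dict Int (Int × Int) :=
  if k = 0 then memo
  else if PySem.Int.mod k z = 0 then memo.insert k (PySem.Int.floordiv k z, 0)
  else
    let best := weights.foldl (fun (best : Option (Int × Int)) w =>
      if 0 ≤ k - w then
        if (memo.getD (k - w) (-1, 0)).1 ≠ -1 then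
          let v : Int := (memo.getD (k - w) (-1, 0)).1 + 1 +
            (if (wd.getD w (0, 0)).1 ≠ (memo.getD (k - w) (-1, 0)).2 then 1 else 0)
          match best with
          | none => some (v, (wd.getD w (0, 0)).2)
          | some b => if v < b.1 then some (v, (wd.getD w (0, 0)).2) else best
        else best
      else best) none
    memo.insert k (best.getD (-1, 0))

def solution_alt (n : Int) (z : Int) (roads : List (List Int)) (queries : List Int) : List Int :=
  let wd := mkWDict roads
  let weights := wd.keys
  let roots : PySem.Set Int := PySem.Set.ofList (queries.filter (fun c => decide (0 ≤ c)))
  let m := PySem.List.maxD roots (fun x => x) 0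
  let needed := (PySem.List.pyRange m 0 (-1)).foldl (bClosure z weights) roots
  let memo := (PySem.List.sorted needed (fun x => x) false).foldl (bEval z wd weights)
      (PySem.Dict.empty.insert 0 (0, 0))
  queries.map (fun c => (memo.getD c (-1, 0)).1)

-- ===== PRECONDITION & SPEC =====
-- a negative query wraps around Python's list indexing; it is in range for A iff it is
-- ≥ -(1 + running max of the earlier queries and 0) — pm below is that running max
def preNegOK : List Int → Int → Bool
  | [], _ => true
  | q :: qs, pm => (-(1 + pm) ≤ q) && preNegOK qs (max pm q)

-- Pre_ excludes exactly the inputs on which Python A raises: a road row shorter than 3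
-- entries (IndexError), a dp extension step that divides by zero or hits a non-positive
-- road weight (ZeroDivisionError / IndexError; the extension runs iff some query is
-- positive, and with z = ±1 it never scans the weights), and a negative query below the
-- wraparound range of the dp list at its time (IndexError).
def Pre_solution (n : Int) (z : Int) (roads : List (List Int)) (queries : List Int) : Prop :=
  (∀ r ∈ roads, 3 ≤ r.length) ∧
  ((z ≠ 0 ∧ ((∀ r ∈ roads, 1 ≤ r.getD 2 0) ∨ z = 1 ∨ z = -1)) ∨ (∀ q ∈ queries, q ≤ 0)) ∧
  preNegOK queries 0 = true
instance (n : Int) (z : Int) (roads : List (List Int)) (queries : List Int) : Decidable (Pre_solution n z roads queries) := by unfold Pre_solution; infer_instance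

def pvWitness_solution : Int × Int × List (List Int) × List Int := (4, 2, [[0, 1, 3]], [5])

-- On inputs containing a negative query A returns the value of dp[c] by Python
-- negative-index wraparound into the partially grown dp list (so the answer depends on the
-- other queries), while B treats a negative transform count as unreachable and returns -1,
-- the intended value for a state that does not exist.
def D_solution (n : Int) (z : Int) (roads : List (List Int)) (queries : List Int) : Prop :=
  ∃ q ∈ queries, q < 0
instance (n : Int) (z : Int) (roads : List (List Int)) (queries : List Int) : Decidable (D_solution n z roads queries) := by unfold D_solution; infer_instance

def Spec_solution (n : Int) (z : Int) (roads : List (List Int)) (queries : List Int) (out : List Int) : Prop := ¬ D_solution n z roads queries → out = solution_alt n z roads queries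
instance (n : Int) (z : Int) (roads : List (List Int)) (queries : List Int) (out : List Int) : Decidable (Spec_solution n z roads queries out) := by unfold Spec_solution; infer_instance

def pvDiffWitness_solution : Int × Int × List (List Int) × List Int := (0, 2, [], [-1])
def pvDiffWitnessOut_solution : (List Int) × (List Int) := ([0], [-1])

-- ===== CLAIM (what is proved, stated in full; the proofs are below) =====
def Claim_unchanged_solution : Prop := ∀ (n : Int) (z : Int) (roads : List (List Int)) (queries : List Int), Dom_solution n z roads queries → Pre_solution n z roads queries → Spec_solution n z roads queries (solution n z roads queries)
def Claim_changed_solution : Prop := Dom_solution (pvDiffWitness_solution.1) (pvDiffWitness_solution.2.1) (pvDiffWitness_solution.2.2.1) (pvDiffWitness_solution.2.2.2) ∧ Pre_solution (pvDiffWitness_solution.1) (pvDiffWitness_solution.2.1) (pvDiffWitness_solution.2.2.1) (pvDiffWitness_solution.2.2.2) ∧ D_solution (pvDiffWitness_solution.1) (pvDiffWitness_solution.2.1) (pvDiffWitness_solution.2.2.1) (pvDiffWitness_solution.2.2.2) ∧ solution (pvDiffWitness_solution.1) (pvDiffWitness_solution.2.1) (pvDiffWitness_solution.2.2.1) (pvDiffWitness_solution.2.2.2)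 = pvDiffWitnessOut_solution.1 ∧ solution_alt (pvDiffWitness_solution.1) (pvDiffWitness_solution.2.1) (pvDiffWitness_solution.2.2.1) (pvDiffWitness_solution.2.2.2) = pvDiffWitnessOut_solution.2 ∧ pvDiffWitnessOut_solution.1 ≠ pvDiffWitnessOut_solution.2

-- ===== LEMMAS AND PROOFS =====

-- the reference table: state k's (cost, location) pair, defined by the shared recurrence
def solnStepB (z : Int) (items : List (Int × Int × Int)) (table : List (Int × Int))
    (k : Int) : List (Int × Int) :=
  if PySem.Int.mod k z = 0 then table ++ [(PySem.Int.floordiv k z, 0)]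
  else
    let best := items.foldl (fun (best : Option (Int × Int)) it =>
      if it.1 ≤ k ∧ (PySem.List.pyGetD table (k - it.1) (0, 0)).1 ≠ -1 then
        let v : Int := (PySem.List.pyGetD table (k - it.1) (0, 0)).1 + 1 +
          (if it.2.1 ≠ (PySem.List.pyGetD table (k - it.1) (0, 0)).2 then 1 else 0)
        match best with
        | none => some (v, it.2.2)
        | some p => if v < p.1 then some (v, it.2.2) else best
      else best) none
    table ++ [best.getD (-1, 0)]

-- reference table after filling states 1..j
def solnTbl (z : Int) (items : List (Int × Int × Int)) : Nat → List (Int × Int)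
  | 0 => [(0, 0)]
  | j + 1 => solnStepB z items (solnTbl z items j) ((j : Int) + 1)

-- the (cost, location) entry of state i (entries are stable once appended)
def solnE (z : Int) (items : List (Int × Int × Int)) (i : Nat) : Int × Int :=
  (solnTbl z items i).getD i (0, 0)

-- candidate value and guard of one weight item p at state k over a table
def solnCand (table : List (Int × Int)) (k : Int) (p : Int × Int × Int) : Int :=
  (PySem.List.pyGetD table (k - p.1) (0, 0)).1 + 1 +
    (if p.2.1 ≠ (PySem.List.pyGetD table (k - p.1) (0, 0)).2 then 1 else 0)

def solnGuard (table : List (Int × Int)) (k : Int) (p : Int × Int × Int) : Bool :=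
  decide (p.1 ≤ k ∧ (PySem.List.pyGetD table (k - p.1) (0, 0)).1 ≠ -1)

-- the reference recurrence's inner fold function, named
def solnFB (table : List (Int × Int)) (k : Int) :
    Option (Int × Int) → (Int × Int × Int) → Option (Int × Int) := fun best it =>
  if it.1 ≤ k ∧ (PySem.List.pyGetD table (k - it.1) (0, 0)).1 ≠ -1 then
    let v : Int := (PySem.List.pyGetD table (k - it.1) (0, 0)).1 + 1 +
      (if it.2.1 ≠ (PySem.List.pyGetD table (k - it.1) (0, 0)).2 then 1 else 0)
    match best with
    | none => some (v, it.2.2)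
    | some p => if v < p.1 then some (v, it.2.2) else best
  else best

lemma solnStepB_eq (z : Int) (items : List (Int × Int × Int)) (table : List (Int × Int))
    (k : Int) : solnStepB z items table k =
    if PySem.Int.mod k z = 0 then table ++ [(PySem.Int.floordiv k z, 0)]
    else table ++ [((items.foldl (solnFB table k) none).getD (-1, 0))] := rfl

lemma solnStepB_exists_append (z : Int) (items : List (Int × Int × Int))
    (table : List (Int × Int)) (k : Int) :
    ∃ e, solnStepB z items table k = table ++ [e] := by
  rw [solnStepB_eq]; split_ifs <;> exact ⟨_, rfl⟩

lemma length_solnTbl (z : Int) (items : List (Int × Int × Int)) (j : Nat) :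
    (solnTbl z items j).length = j + 1 := by
  induction j with
  | zero => rfl
  | succ j ih =>
    obtain ⟨e, he⟩ := solnStepB_exists_append z items (solnTbl z items j) ((j : Int) + 1)
    simp [solnTbl, he, ih]

lemma getElem?_solnTbl (z : Int) (items : List (Int × Int × Int)) {i j : Nat} (h : i ≤ j) :
    (solnTbl z items j)[i]? = some (solnE z items i) := by
  induction j with
  | zero =>
    interval_cases i
    rfl
  | succ j ih =>
    rcases Nat.lt_or_ge i (j + 1) with hlt | hge
    · obtain ⟨e, he⟩ := solnStepB_exists_append z items (solnTbl z items j) ((j : Int) + 1)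
      rw [solnTbl, he, List.getElem?_append_left (by rw [length_solnTbl]; exact hlt),
        ih (by omega)]
    · have hij : i = j + 1 := by omega
      subst hij
      have hlen : j + 1 < (solnTbl z items (j + 1)).length := by rw [length_solnTbl]; omega
      rw [List.getElem?_eq_getElem hlen, solnE, List.getD_eq_getElem _ _ hlen]

lemma pyGetD_solnTbl (z : Int) (items : List (Int × Int × Int)) {c : Int} {j : Nat}
    (h0 : 0 ≤ c) (hj : c.toNat ≤ j) :
    PySem.List.pyGetD (solnTbl z items j) c (0, 0) = solnE z items c.toNat := by
  have hlen : c < ((solnTbl z items j).length : Int) := by rw [length_solnTbl]; omega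
  rw [PySem.List.pyGetD_eq_getElem _ _ h0 hlen]
  have := getElem?_solnTbl z items (j := j) (i := c.toNat) hj
  rw [List.getElem?_eq_getElem (by omega : c.toNat < (solnTbl z items j).length)] at this
  exact Option.some_injective _ this

lemma solnGetD_append_self {α : Type} (t : List α) (e d : α) :
    (t ++ [e]).getD t.length d = e := by
  simp [List.getD]

-- the entry appended for state j+1
lemma solnE_succ (z : Int) (items : List (Int × Int × Int)) (j : Nat) :
    solnE z items (j + 1) =
      (if PySem.Int.mod ((j : Int) + 1) z = 0 then (PySem.Int.floordiv ((j : Int) + 1) z, 0)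
       else ((items.foldl (solnFB (solnTbl z items j) ((j : Int) + 1)) none).getD (-1, 0))) := by
  have hstep : solnTbl z items (j + 1) =
      solnStepB z items (solnTbl z items j) ((j : Int) + 1) := rfl
  unfold solnE
  rw [hstep, solnStepB_eq]
  split_ifs with h
  · rw [show j + 1 = (solnTbl z items j).length from (length_solnTbl z items j).symm,
      solnGetD_append_self]
  · rw [show j + 1 = (solnTbl z items j).length from (length_solnTbl z items j).symm,
      solnGetD_append_self]

lemma solnModOne (k z : Int) (h : z = 1 ∨ z = -1) : PySem.Int.mod k z = 0 := by
  rcases h with h | h <;> subst h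
  · exact (PySem.Int.mod_eq_zero_iff_dvd k 1).mpr (one_dvd k)
  · exact (PySem.Int.mod_eq_zero_iff_dvd k (-1)).mpr ⟨-k, by ring⟩

-- A's key scan, rewritten as a fold over the items list
lemma solnScanA_eq (wd : PySem.Dict Int (Int × Int)) (hnd : wd.keys.Nodup)
    (table : List (Int × Int)) (k : Int) :
    solnScanA wd (table.map Prod.fst) (table.map Prod.snd) k =
      wd.items.foldl (fun acc p =>
        if solnGuard table k p then
          (if solnCand table k p < acc.1 then (solnCand table k p, p.2.2) else acc)
        else acc) (10000000000, 0) := by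
  unfold solnScanA
  have hkeys : wd.keys = wd.items.map Prod.fst := rfl
  rw [hkeys, List.foldl_map]
  refine PySem.List.foldl_congr_mem _ _ _ _ (fun acc p hp => ?_)
  have h3 : wd.getD p.1 (0, 0) = p.2 :=
    PySem.Dict.getD_of_mem_items wd (by simpa using hp) hnd (0, 0)
  have h1 : PySem.List.pyGetD (table.map Prod.fst) (k - p.1) 0 =
      (PySem.List.pyGetD table (k - p.1) (0, 0)).1 :=
    PySem.List.pyGetD_map Prod.fst table (k - p.1) (0, 0)
  have h2 : PySem.List.pyGetD (table.map Prod.snd) (k - p.1) 0 =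
      (PySem.List.pyGetD table (k - p.1) (0, 0)).2 :=
    PySem.List.pyGetD_map Prod.snd table (k - p.1) (0, 0)
  rw [h1, h2, h3]
  by_cases hg : p.1 ≤ k ∧ (PySem.List.pyGetD table (k - p.1) (0, 0)).1 ≠ -1
  · rw [if_pos (show (0:Int) ≤ k - p.1 ∧ (PySem.List.pyGetD table (k - p.1) (0, 0)).1 ≠ -1 by
        exact ⟨by omega, hg.2⟩),
      if_pos (show solnGuard table k p = true from decide_eq_true hg)]
    rfl
  · rw [if_neg (show ¬((0:Int) ≤ k - p.1 ∧ (PySem.List.pyGetD table (k - p.1) (0, 0)).1 ≠ -1) by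
        intro hcon; exact hg ⟨by omega, hcon.2⟩),
      if_neg (show ¬ solnGuard table k p = true by simpa [solnGuard] using hg)]

-- relation between A's sentinel accumulator and the reference Option accumulator
def solnInv (a : Int × Int) (b : Option (Int × Int)) : Prop :=
  (a = (10000000000, 0) ∧ b = none) ∨ (b = some a ∧ a.1 < 10000000000)

lemma solnFB_fold_le (table : List (Int × Int)) (k : Int) (l : List (Int × Int × Int))
    (hc : ∀ p ∈ l, solnGuard table k p = true → solnCand table k p ≤ 2 * k) :
    ∀ b0, (∀ q, b0 = some q → q.1 ≤ 2 * k) →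
      ∀ q, l.foldl (solnFB table k) b0 = some q → q.1 ≤ 2 * k := by
  induction l with
  | nil => intro b0 hb0 q hq; exact hb0 q hq
  | cons p l ih =>
    intro b0 hb0 q hq
    rw [List.foldl_cons] at hq
    refine ih (fun p' hp' => hc p' (List.mem_cons_of_mem _ hp')) _ ?_ q hq
    intro q' hq'
    have hcp := hc p List.mem_cons_self
    unfold solnFB at hq'
    by_cases hg : p.1 ≤ k ∧ (PySem.List.pyGetD table (k - p.1) (0, 0)).1 ≠ -1
    · rw [if_pos hg] at hq'
      have hcand : solnCand table k p ≤ 2 * k := hcp (by simp [solnGuard, hg])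
      cases b0 with
      | none =>
        change some (solnCand table k p, p.2.2) = some q' at hq'
        simp only [Option.some.injEq] at hq'
        rw [← hq']
        exact hcand
      | some pp =>
        change (if solnCand table k p < pp.1 then some (solnCand table k p, p.2.2)
          else some pp) = some q' at hq'
        by_cases hlt : solnCand table k p < pp.1
        · rw [if_pos hlt] at hq'
          simp only [Option.some.injEq] at hq'
          rw [← hq']
          exact hcand
        · rw [if_neg hlt] at hq'
          exact hb0 q' hq'
    · rw [if_neg hg] at hq'
      exact hb0 q' hq'

lemma solnFloordiv_le (k z : Int) (h0 : 0 ≤ k) (hz : z ≠ 0) :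
    PySem.Int.floordiv k z ≤ 2 * k := by
  rcases lt_or_gt_of_ne hz with hneg | hpos
  · have h1 := PySem.Int.floordiv_mul_add_mod k z
    have h2 := PySem.Int.mod_neg_bounds k hneg
    nlinarith
  · rw [PySem.Int.floordiv_eq_ediv_of_pos hpos]
    have := Int.ediv_le_self z h0
    omega

-- a guarded candidate at state j+1 is bounded, assuming bounded earlier entries
lemma solnCand_le (z : Int) (items : List (Int × Int × Int))
    (hpos : ∀ p ∈ items, 1 ≤ p.1) (j : Nat)
    (hprev : ∀ i : Nat, i ≤ j → (solnE z items i).1 ≤ 2 * i)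
    (p : Int × Int × Int) (hp : p ∈ items)
    (hg : solnGuard (solnTbl z items j) ((j : Int) + 1) p = true) :
    solnCand (solnTbl z items j) ((j : Int) + 1) p ≤ 2 * ((j : Int) + 1) := by
  have hg' := of_decide_eq_true hg
  obtain ⟨hle, _⟩ := hg'
  have hw := hpos p hp
  have h0 : (0 : Int) ≤ (j : Int) + 1 - p.1 := by omega
  have hjn : ((j : Int) + 1 - p.1).toNat ≤ j := by omega
  have hget := pyGetD_solnTbl z items (c := (j : Int) + 1 - p.1) (j := j) h0 hjn
  have hb := hprev ((j : Int) + 1 - p.1).toNat hjn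
  unfold solnCand
  rw [hget]
  have hcast : ((((j : Int) + 1 - p.1).toNat : Nat) : Int) = (j : Int) + 1 - p.1 := by omega
  rw [hcast] at hb
  split_ifs <;> omega

-- every reference cost is at most twice its index (weights positive, unless |z| = 1 keeps
-- every state on the division branch)
lemma solnE_fst_le (z : Int) (items : List (Int × Int × Int)) (hz : z ≠ 0)
    (hsafe : (∀ p ∈ items, 1 ≤ p.1) ∨ z = 1 ∨ z = -1) :
    ∀ i : Nat, (solnE z items i).1 ≤ 2 * i := by
  intro i
  induction i using Nat.strong_induction_on with
  | _ i ih =>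
    match i with
    | 0 => simp [solnE, solnTbl]
    | j + 1 =>
      rw [solnE_succ]
      have hprev : ∀ i' : Nat, i' ≤ j → (solnE z items i').1 ≤ 2 * i' := fun i' hi' =>
        ih i' (by omega)
      split_ifs with h
      · have := solnFloordiv_le ((j : Int) + 1) z (by omega) hz
        push_cast
        simpa using this
      · have hpos : ∀ p ∈ items, 1 ≤ p.1 := by
          rcases hsafe with hpos | hone
          · exact hpos
          · exact absurd (solnModOne ((j : Int) + 1) z hone) h
        rcases hbest : items.foldl (solnFB (solnTbl z items j) ((j : Int) + 1)) none with
          _ | q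
        · push_cast; simp; omega
        · have := solnFB_fold_le (solnTbl z items j) ((j : Int) + 1) items
            (fun p hp hg => solnCand_le z items hpos j hprev p hp hg)
            none (by intro q hq; cases hq) q hbest
          push_cast
          simpa using this

lemma solnFold_rel (table : List (Int × Int)) (k : Int) (l : List (Int × Int × Int))
    (hv : ∀ p ∈ l, solnGuard table k p = true → solnCand table k p < 10000000000) :
    ∀ a0 b0, solnInv a0 b0 →
      solnInv (l.foldl (fun acc p =>
          if solnGuard table k p then
            (if solnCand table k p < acc.1 then (solnCand table k p, p.2.2) else acc)
          else acc) a0)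
        (l.foldl (solnFB table k) b0) := by
  induction l with
  | nil => intro a0 b0 h; exact h
  | cons p l ih =>
    intro a0 b0 h
    rw [List.foldl_cons, List.foldl_cons]
    refine ih (fun p' hp' => hv p' (List.mem_cons_of_mem _ hp')) _ _ ?_
    have hvp := hv p List.mem_cons_self
    by_cases hg : p.1 ≤ k ∧ (PySem.List.pyGetD table (k - p.1) (0, 0)).1 ≠ -1
    · have hgb : solnGuard table k p = true := decide_eq_true hg
      have hcand : solnCand table k p < 10000000000 := hvp hgb
      rw [if_pos hgb]
      have hfbn : solnFB table k none p = some (solnCand table k p, p.2.2) := by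
        unfold solnFB
        rw [if_pos hg]
        rfl
      have hfbs : ∀ a1 : Int × Int, solnFB table k (some a1) p =
          if solnCand table k p < a1.1 then some (solnCand table k p, p.2.2)
          else some a1 := by
        intro a1
        unfold solnFB
        rw [if_pos hg]
        rfl
      rcases h with ⟨ha, hb⟩ | ⟨hb, ha⟩
      · subst ha; subst hb
        rw [if_pos (show solnCand table k p < ((10000000000 : Int), (0 : Int)).1 from hcand),
          hfbn]
        right
        exact ⟨rfl, hcand⟩
      · subst hb
        rw [hfbs a0]
        by_cases hlt : solnCand table k p < a0.1
        · rw [if_pos hlt, if_pos hlt]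
          right
          exact ⟨rfl, hcand⟩
        · rw [if_neg hlt, if_neg hlt]
          right
          exact ⟨rfl, ha⟩
    · have hgb : ¬ solnGuard table k p = true := by simpa [solnGuard] using hg
      rw [if_neg hgb]
      have : solnFB table k b0 p = b0 := by
        unfold solnFB
        rw [if_neg hg]
      rw [this]
      exact h

-- one full run of A's while-loop lands on the reference table at index max j c.toNat
lemma solnExtendAGo_eq (z c : Int) (wd : PySem.Dict Int (Int × Int))
    (items : List (Int × Int × Int)) (hitems : items = wd.items) (hnd : wd.keys.Nodup)
    (hz : z ≠ 0) (hsafe : (∀ p ∈ items, 1 ≤ p.1) ∨ z = 1 ∨ z = -1)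
    (hc : c ≤ 2147483648) :
    ∀ (fuel : Nat) (j : Nat), (fuel : Int) = max (c + 1 - ((j : Int) + 1)) 0 →
      solnExtendAGo z c wd fuel ((solnTbl z items j).map Prod.fst)
          ((solnTbl z items j).map Prod.snd) =
        ((solnTbl z items (max j c.toNat)).map Prod.fst,
         (solnTbl z items (max j c.toNat)).map Prod.snd) := by
  intro fuel
  induction fuel with
  | zero =>
    intro j hfuel
    have hj : c.toNat ≤ j := by omega
    rw [Nat.max_eq_left hj]
    rfl
  | succ fuel ih =>
    intro j hfuel
    have hjc : (j : Int) < c := by push_cast at hfuel; omega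
    have hmaxs : max (j + 1) c.toNat = max j c.toNat := by omega
    have hmaps : ((solnTbl z items j).map Prod.fst).length = j + 1 := by
      simp [length_solnTbl]
    rw [solnExtendAGo, hmaps]
    rw [if_pos (by push_cast; omega : ((j + 1 : Nat) : Int) ≤ c)]
    by_cases hmod : PySem.Int.mod ((j + 1 : Nat) : Int) z = 0
    · rw [if_pos hmod]
      have htbl1 : solnTbl z items (j + 1) =
          solnTbl z items j ++ [(PySem.Int.floordiv ((j : Int) + 1) z, 0)] := by
        rw [show solnTbl z items (j + 1) =
            solnStepB z items (solnTbl z items j) ((j : Int) + 1) from rfl,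
          solnStepB_eq, if_pos (by push_cast at hmod ⊢; exact hmod)]
      have e1 : (solnTbl z items j).map Prod.fst ++ [PySem.Int.floordiv ((j + 1 : Nat) : Int) z]
          = (solnTbl z items (j + 1)).map Prod.fst := by
        rw [htbl1]; push_cast; simp
      have e2 : (solnTbl z items j).map Prod.snd ++ [(0 : Int)]
          = (solnTbl z items (j + 1)).map Prod.snd := by
        rw [htbl1]; simp
      rw [e1, e2, ih (j + 1) (by push_cast at hfuel ⊢; omega), hmaxs]
    · rw [if_neg hmod]
      rw [solnScanA_eq wd hnd, ← hitems]
      have hpos : ∀ p ∈ items, 1 ≤ p.1 := by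
        rcases hsafe with hpos | hone
        · exact hpos
        · exact absurd (solnModOne ((j + 1 : Nat) : Int) z hone) hmod
      have hv : ∀ p ∈ items, solnGuard (solnTbl z items j) ((j + 1 : Nat) : Int) p = true →
          solnCand (solnTbl z items j) ((j + 1 : Nat) : Int) p < 10000000000 := by
        intro p hp hg
        have hprev : ∀ i : Nat, i ≤ j → (solnE z items i).1 ≤ 2 * i := fun i _ =>
          solnE_fst_le z items hz hsafe i
        push_cast at hg
        have hcl := solnCand_le z items hpos j hprev p hp hg
        push_cast
        omega
      have hrel := solnFold_rel (solnTbl z items j) ((j + 1 : Nat) : Int) items hv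
        (10000000000, 0) none (Or.inl ⟨rfl, rfl⟩)
      rcases hrel with ⟨hA, hB⟩ | ⟨hB, hlt⟩
      · rw [hA]
        show (if ((10000000000 : Int), (0 : Int)).1 = 10000000000 then _ else _) = _
        rw [if_pos rfl]
        have htbl1 : solnTbl z items (j + 1) = solnTbl z items j ++ [(-1, 0)] := by
          rw [show solnTbl z items (j + 1) =
              solnStepB z items (solnTbl z items j) ((j : Int) + 1) from rfl,
            solnStepB_eq, if_neg (by push_cast at hmod ⊢; exact hmod),
            show ((j : Int) + 1) = ((j + 1 : Nat) : Int) by push_cast; ring, hB]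
          rfl
        have e1 : (solnTbl z items j).map Prod.fst ++ [(-1 : Int)]
            = (solnTbl z items (j + 1)).map Prod.fst := by rw [htbl1]; simp
        have e2 : (solnTbl z items j).map Prod.snd ++ [(0 : Int)]
            = (solnTbl z items (j + 1)).map Prod.snd := by rw [htbl1]; simp
        rw [e1, e2, ih (j + 1) (by push_cast at hfuel ⊢; omega), hmaxs]
      · set sA := items.foldl (fun acc p =>
            if solnGuard (solnTbl z items j) ((j + 1 : Nat) : Int) p = true then
              (if solnCand (solnTbl z items j) ((j + 1 : Nat) : Int) p < acc.1 then
                (solnCand (solnTbl z items j) ((j + 1 : Nat) : Int) p, p.2.2) else acc)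
            else acc) (10000000000, 0) with hsA
        show (if sA.1 = 10000000000 then _ else _) = _
        rw [if_neg (by omega)]
        have htbl1 : solnTbl z items (j + 1) = solnTbl z items j ++ [sA] := by
          rw [show solnTbl z items (j + 1) =
              solnStepB z items (solnTbl z items j) ((j : Int) + 1) from rfl,
            solnStepB_eq, if_neg (by push_cast at hmod ⊢; exact hmod),
            show ((j : Int) + 1) = ((j + 1 : Nat) : Int) by push_cast; ring, hB]
          rfl
        have e1 : (solnTbl z items j).map Prod.fst ++ [sA.1]
            = (solnTbl z items (j + 1)).map Prod.fst := by rw [htbl1]; simp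
        have e2 : (solnTbl z items j).map Prod.snd ++ [sA.2]
            = (solnTbl z items (j + 1)).map Prod.snd := by rw [htbl1]; simp
        rw [e1, e2, ih (j + 1) (by push_cast at hfuel ⊢; omega), hmaxs]

lemma solnExtendA_eq (z c : Int) (wd : PySem.Dict Int (Int × Int))
    (items : List (Int × Int × Int)) (hitems : items = wd.items) (hnd : wd.keys.Nodup)
    (hz : z ≠ 0) (hsafe : (∀ p ∈ items, 1 ≤ p.1) ∨ z = 1 ∨ z = -1)
    (hc : c ≤ 2147483648) (j : Nat) :
    solnExtendA z c wd ((solnTbl z items j).map Prod.fst)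
        ((solnTbl z items j).map Prod.snd) =
      ((solnTbl z items (max j c.toNat)).map Prod.fst,
       (solnTbl z items (max j c.toNat)).map Prod.snd) := by
  unfold solnExtendA
  rw [solnExtendAGo_eq z c wd items hitems hnd hz hsafe hc _ j (by
    simp only [List.length_map, length_solnTbl]
    push_cast
    omega)]

-- A's query fold produces, for nonnegative queries, the per-query reference costs
lemma solnFoldQueries (z : Int) (wd : PySem.Dict Int (Int × Int))
    (items : List (Int × Int × Int)) (hitems : items = wd.items) (hnd : wd.keys.Nodup)
    (hz : z ≠ 0) (hsafe : (∀ p ∈ items, 1 ≤ p.1) ∨ z = 1 ∨ z = -1)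
    (M : Nat) (hM : (M : Int) ≤ 2147483648) :
    ∀ (qs : List Int), (∀ q ∈ qs, 0 ≤ q ∧ q ≤ (M : Int)) → ∀ (j : Nat), j ≤ M →
      ∀ (ans : List Int),
      (qs.foldl (fun (st : List Int × List Int × List Int) c =>
          let r := solnExtendA z c wd st.1 st.2.1
          (r.1, r.2, st.2.2 ++ [PySem.List.pyGetD r.1 c 0]))
        ((solnTbl z items j).map Prod.fst, (solnTbl z items j).map Prod.snd, ans)).2.2 =
      ans ++ qs.map (fun c => (solnE z items c.toNat).1) := by
  intro qs
  induction qs with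
  | nil => intro _ j _ ans; simp
  | cons c qs ih =>
    intro hqs j hjM ans
    obtain ⟨hc0, hcM⟩ := hqs c List.mem_cons_self
    rw [List.foldl_cons]
    have hext := solnExtendA_eq z c wd items hitems hnd hz hsafe (by omega) j
    simp only [hext]
    have hlook : PySem.List.pyGetD ((solnTbl z items (max j c.toNat)).map Prod.fst) c 0 =
        (solnE z items c.toNat).1 := by
      have h1 : PySem.List.pyGetD ((solnTbl z items (max j c.toNat)).map Prod.fst) c 0 =
          (PySem.List.pyGetD (solnTbl z items (max j c.toNat)) c (0, 0)).1 :=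
        PySem.List.pyGetD_map Prod.fst _ c (0, 0)
      rw [h1, pyGetD_solnTbl z items hc0 (by omega)]
    rw [hlook, ih (fun q hq => hqs q (List.mem_cons_of_mem _ hq)) (max j c.toNat)
      (by omega) _]
    simp

-- when no query is positive the dp list never grows and every answer reads the seed entry
lemma solnFoldQueriesNonpos (z : Int) (wd : PySem.Dict Int (Int × Int)) :
    ∀ (qs : List Int), (∀ q ∈ qs, q ≤ 0) → ∀ (ans : List Int),
      (qs.foldl (fun (st : List Int × List Int × List Int) c =>
          let r := solnExtendA z c wd st.1 st.2.1
          (r.1, r.2, st.2.2 ++ [PySem.List.pyGetD r.1 c 0]))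
        ([0], [0], ans)).2.2 =
      ans ++ qs.map (fun c => PySem.List.pyGetD [(0 : Int)] c 0) := by
  intro qs
  induction qs with
  | nil => intro _ ans; simp
  | cons c qs ih =>
    intro hqs ans
    rw [List.foldl_cons]
    have hid : solnExtendA z c wd [0] [0] = ([0], [0]) := by
      unfold solnExtendA
      rw [show (c + 1 - (([(0 : Int)] : List Int).length : Int)).toNat = 0 by
        have := hqs c List.mem_cons_self
        simp
        omega]
      rfl
    simp only [hid]
    rw [ih (fun q hq => hqs q (List.mem_cons_of_mem _ hq)) (ans ++ [_])]
    simp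

-- the weights stored in w_dict are the third road entries
lemma mkWDict_keys_pos (roads : List (List Int)) (hw : ∀ r ∈ roads, 1 ≤ r.getD 2 0) :
    ∀ p ∈ (mkWDict roads).items, 1 ≤ p.1 := by
  intro p hp
  have hk : p.1 ∈ (mkWDict roads).keys := by
    have : p.1 ∈ (mkWDict roads).items.map Prod.fst := List.mem_map_of_mem hp
    exact this
  rw [mkWDict, PySem.Dict.keys_foldl_insert_key roads
    (fun road => PySem.List.pyGetD road 2 0)
    (fun _ road => (PySem.List.pyGetD road 0 0, PySem.List.pyGetD road 1 0)),
    PySem.Dict.keys_empty, PySem.Set.update_nil_left] at hk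
  rw [PySem.Set.mem_ofList] at hk
  obtain ⟨r, hr, hrk⟩ := List.mem_map.mp hk
  rw [← hrk, PySem.List.pyGetD_ofNat']
  exact hw r hr

lemma mkWDict_nodup_keys (roads : List (List Int)) : (mkWDict roads).keys.Nodup := by
  exact PySem.Dict.nodup_keys_foldl_insert_key roads
    (fun road => PySem.List.pyGetD road 2 0)
    (fun _ road => (PySem.List.pyGetD road 0 0, PySem.List.pyGetD road 1 0))
    PySem.Dict.empty PySem.Dict.nodup_keys_empty

-- ----- B-side lemmas -----

-- the discovery invariant: every already-processed needed state has its predecessors marked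
def closureInv (z : Int) (weights : List Int) (S : List Int) (j : Int) : Prop :=
  ∀ x ∈ S, j < x → PySem.Int.mod x z ≠ 0 → ∀ w ∈ weights, 0 ≤ x - w → x - w ∈ S

-- the inner marking fold is a Set.update with the in-range predecessors
lemma bClosure_inner_eq (weights : List Int) (S : PySem.Set Int) (k : Int) :
    weights.foldl (fun nd2 w => if 0 ≤ k - w then PySem.Set.add nd2 (k - w) else nd2) S =
      PySem.Set.update S ((weights.filter (fun w => decide (0 ≤ k - w))).map (fun w => k - w)) := by
  rw [PySem.Set.update_map_eq_foldl_add, ← PySem.List.foldl_ite_eq_foldl_filter]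

lemma closure_go (z : Int) (weights : List Int)
    (hsafe : (∀ w ∈ weights, 1 ≤ w) ∨ z = 1 ∨ z = -1) :
    ∀ (j : Nat) (S : PySem.Set Int), S.Nodup → (∀ x ∈ S, 0 ≤ x) →
      closureInv z weights S (j : Int) →
      (((PySem.List.pyRange (j : Int) 0 (-1)).foldl (bClosure z weights) S).Nodup ∧
       (∀ x ∈ S, x ∈ (PySem.List.pyRange (j : Int) 0 (-1)).foldl (bClosure z weights) S) ∧
       (∀ x ∈ (PySem.List.pyRange (j : Int) 0 (-1)).foldl (bClosure z weights) S, 0 ≤ x) ∧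
       closureInv z weights ((PySem.List.pyRange (j : Int) 0 (-1)).foldl (bClosure z weights) S) 0) := by
  intro j
  induction j with
  | zero =>
    intro S hnd h0 hinv
    rw [PySem.List.pyRange_neg_one_eq_nil (by omega)]
    exact ⟨hnd, fun x hx => hx, h0, by simpa using hinv⟩
  | succ j ih =>
    intro S hnd h0 hinv
    rw [PySem.List.pyRange_neg_one_cons (by push_cast; omega),
      show ((j + 1 : Nat) : Int) - 1 = (j : Int) by push_cast; ring, List.foldl_cons]
    by_cases hg : S.contains ((j + 1 : Nat) : Int) = true ∧
        PySem.Int.mod ((j + 1 : Nat) : Int) z ≠ 0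
    · have hw1 : ∀ w ∈ weights, 1 ≤ w := by
        rcases hsafe with h | h
        · exact h
        · exact absurd (solnModOne ((j + 1 : Nat) : Int) z h) hg.2
      have hstep : bClosure z weights S ((j + 1 : Nat) : Int) =
          PySem.Set.update S ((weights.filter (fun w => decide (0 ≤ ((j + 1 : Nat) : Int) - w))).map
            (fun w => ((j + 1 : Nat) : Int) - w)) := by
        rw [bClosure, if_pos hg, bClosure_inner_eq]
      set S' := PySem.Set.update S ((weights.filter (fun w => decide (0 ≤ ((j + 1 : Nat) : Int) - w))).map
            (fun w => ((j + 1 : Nat) : Int) - w)) with hS'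
      have hmemS' : ∀ y : Int, y ∈ S' ↔ y ∈ S ∨
          ∃ w ∈ weights, 0 ≤ ((j + 1 : Nat) : Int) - w ∧ y = ((j + 1 : Nat) : Int) - w := by
        intro y
        rw [hS', PySem.Set.mem_update]
        constructor
        · rintro (h | h)
          · exact Or.inl h
          · obtain ⟨w, hw, hwy⟩ := List.mem_map.mp h
            obtain ⟨hwmem, hwok⟩ := List.mem_filter.mp hw
            exact Or.inr ⟨w, hwmem, by simpa using hwok, hwy.symm⟩
        · rintro (h | ⟨w, hw, hok, hy⟩)
          · exact Or.inl h
          · exact Or.inr (List.mem_map.mpr ⟨w, List.mem_filter.mpr ⟨hw, by simpa using hok⟩, hy.symm⟩)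
      have hnd' : S'.Nodup := PySem.Set.nodup_update _ _ hnd
      have h0' : ∀ x ∈ S', 0 ≤ x := by
        intro x hx
        rcases (hmemS' x).mp hx with h | ⟨w, _, hok, hy⟩
        · exact h0 x h
        · omega
      have hsub : ∀ x ∈ S, x ∈ S' := fun x hx => (hmemS' x).mpr (Or.inl hx)
      have hinv' : closureInv z weights S' ((j : Nat) : Int) := by
        intro x hx hjx hmod w hw hok
        rcases (hmemS' x).mp hx with hxS | ⟨w', hw', hok', hy⟩
        · rcases eq_or_lt_of_le (show ((j : Nat) : Int) + 1 ≤ x by omega) with hxj | hxj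
          · -- x = j + 1: its predecessors were just added
            refine (hmemS' (x - w)).mpr (Or.inr ⟨w, hw, ?_, ?_⟩) <;> push_cast <;> omega
          · exact hsub _ (hinv x hxS (by push_cast; omega) hmod w hw hok)
        · -- additions are ≤ j, contradicting j < x
          have := hw1 w' hw'
          omega
      rw [hstep]
      obtain ⟨a, b, c, d⟩ := ih S' hnd' h0' hinv'
      exact ⟨a, fun x hx => b x (hsub x hx), c, d⟩
    · have hstep : bClosure z weights S ((j + 1 : Nat) : Int) = S := by
        rw [bClosure, if_neg hg]
      have hinv' : closureInv z weights S ((j : Nat) : Int) := by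
        intro x hx hjx hmod w hw hok
        rcases eq_or_lt_of_le (show ((j : Nat) : Int) + 1 ≤ x by omega) with hxj | hxj
        · exfalso
          apply hg
          have hxe : ((j + 1 : Nat) : Int) = x := by push_cast; omega
          refine ⟨?_, ?_⟩
          · rw [PySem.Set.contains_iff, hxe]
            exact hx
          · rw [hxe]; exact hmod
        · exact hinv x hx (by push_cast; omega) hmod w hw hok
      rw [hstep]
      exact ih S hnd h0 hinv'

-- B's best-candidate fold at a state k equals the reference fold, given that the memo
-- agrees with the reference entries at every smaller needed state
lemma bEval_fold_eq (wd : PySem.Dict Int (Int × Int)) (hnd : wd.keys.Nodup)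
    (z : Int) (items : List (Int × Int × Int)) (hitems : items = wd.items)
    (memo : PySem.Dict Int (Int × Int)) (k : Int) (j : Nat) (hk : k = (j : Int) + 1)
    (hmemo : ∀ w ∈ wd.keys, 0 ≤ k - w →
      memo.getD (k - w) (-1, 0) = solnE z items (k - w).toNat)
    (hw1 : ∀ w ∈ wd.keys, 1 ≤ w) :
    wd.keys.foldl (fun (best : Option (Int × Int)) w =>
      if 0 ≤ k - w then
        if (memo.getD (k - w) (-1, 0)).1 ≠ -1 then
          let v : Int := (memo.getD (k - w) (-1, 0)).1 + 1 +
            (if (wd.getD w (0, 0)).1 ≠ (memo.getD (k - w) (-1, 0)).2 then 1 else 0)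
          match best with
          | none => some (v, (wd.getD w (0, 0)).2)
          | some b => if v < b.1 then some (v, (wd.getD w (0, 0)).2) else best
        else best
      else best) none =
    items.foldl (solnFB (solnTbl z items j) k) none := by
  have hkeys : wd.keys = wd.items.map Prod.fst := rfl
  rw [hkeys, List.foldl_map, ← hitems]
  refine PySem.List.foldl_congr_mem _ _ _ _ (fun best p hp => ?_)
  have hpk : p.1 ∈ wd.keys := by
    rw [hkeys]
    exact List.mem_map_of_mem (hitems ▸ hp)
  have h3 : wd.getD p.1 (0, 0) = p.2 := by
    rw [hitems] at hp
    exact PySem.Dict.getD_of_mem_items wd (by simpa using hp) hnd (0, 0)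
  by_cases hok : 0 ≤ k - p.1
  · have hwge := hw1 p.1 hpk
    have hmem := hmemo p.1 hpk hok
    have htbl : PySem.List.pyGetD (solnTbl z items j) (k - p.1) (0, 0) =
        solnE z items (k - p.1).toNat :=
      pyGetD_solnTbl z items hok (by omega)
    rw [if_pos hok, hmem, h3]
    unfold solnFB
    rw [htbl]
    by_cases hne : (solnE z items (k - p.1).toNat).1 ≠ -1
    · have hcond : p.1 ≤ k ∧ (solnE z items (k - p.1).toNat).1 ≠ -1 := ⟨by omega, hne⟩
      rw [if_pos hne, if_pos hcond]
    · have hcond : ¬(p.1 ≤ k ∧ (solnE z items (k - p.1).toNat).1 ≠ -1) := by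
        rintro ⟨_, h⟩; exact hne h
      rw [if_neg hne, if_neg hcond]
  · rw [if_neg hok]
    unfold solnFB
    rw [if_neg (by rintro ⟨h, _⟩; omega)]

-- the ascending evaluation pass: processing a strictly increasing list of needed states
-- extends the memo with exactly the reference entries of those states
lemma eval_go (z : Int) (wd : PySem.Dict Int (Int × Int)) (hnd : wd.keys.Nodup)
    (items : List (Int × Int × Int)) (hitems : items = wd.items)
    (hsafe : (∀ w ∈ wd.keys, 1 ≤ w) ∨ z = 1 ∨ z = -1)
    (N : List Int) (hN0 : ∀ x ∈ N, 0 ≤ x)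
    (hclose : ∀ k ∈ N, PySem.Int.mod k z ≠ 0 → ∀ w ∈ wd.keys, 0 ≤ k - w → k - w ∈ N) :
    ∀ (l P : List Int), l.Pairwise (· < ·) → (∀ x ∈ l, x ∈ N) →
      (∀ x ∈ N, x ∈ P ∨ x ∈ l) → (∀ x ∈ P, ∀ y ∈ l, x < y) →
      ∀ memo : PySem.Dict Int (Int × Int),
      (∀ y : Int, memo.getD y (-1, 0) =
        if y = 0 ∨ y ∈ P then solnE z items y.toNat else (-1, 0)) →
      ∀ y : Int, (l.foldl (bEval z wd wd.keys) memo).getD y (-1, 0) =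
        if y = 0 ∨ y ∈ P ++ l then solnE z items y.toNat else (-1, 0) := by
  intro l
  induction l with
  | nil =>
    intro P _ _ _ _ memo hmemo y
    simpa using hmemo y
  | cons k rest ih =>
    intro P hpair hlN hsplit horder memo hmemo y
    rw [List.foldl_cons]
    have hkN : k ∈ N := hlN k List.mem_cons_self
    have hk0 : 0 ≤ k := hN0 k hkN
    have hrestN : ∀ x ∈ rest, x ∈ N := fun x hx => hlN x (List.mem_cons_of_mem _ hx)
    have hpair' : rest.Pairwise (· < ·) := hpair.of_cons
    have hkrest : ∀ x ∈ rest, k < x := fun x hx => List.rel_of_pairwise_cons hpair hx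
    by_cases hkz : k = 0
    · -- skipped state 0
      have hstep : bEval z wd wd.keys memo k = memo := by rw [bEval, if_pos hkz]
      rw [hstep]
      have := ih (P ++ [k]) hpair' hrestN
        (by intro x hx
            rcases hsplit x hx with h | h
            · exact Or.inl (List.mem_append_left _ h)
            · rcases List.mem_cons.mp h with h | h
              · exact Or.inl (List.mem_append_right _ (by simp [h]))
              · exact Or.inr h)
        (by intro x hx yy hyy
            rcases List.mem_append.mp hx with h | h
            · exact lt_trans (horder x h k List.mem_cons_self) (hkrest yy hyy)
            · simp at h
              subst h
              exact hkz ▸ hkrest yy hyy)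
        memo
        (by intro yy
            rw [hmemo yy]
            by_cases h1 : yy = 0 ∨ yy ∈ P
            · rw [if_pos h1, if_pos (by rcases h1 with h | h
                                        · exact Or.inl h
                                        · exact Or.inr (List.mem_append_left _ h))]
            · rw [if_neg h1, if_neg (by
                rintro (h | h)
                · exact h1 (Or.inl h)
                · rcases List.mem_append.mp h with h | h
                  · exact h1 (Or.inr h)
                  · simp at h
                    subst h
                    exact h1 (Or.inl hkz))])
        y
      rw [this]
      by_cases h1 : y = 0 ∨ y ∈ (P ++ [k]) ++ rest
      · rw [if_pos h1, if_pos (by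
          rcases h1 with h | h
          · exact Or.inl h
          · simp only [List.mem_append, List.mem_cons] at h ⊢
            tauto)]
      · rw [if_neg h1, if_neg (by
          intro hcon
          apply h1
          rcases hcon with h | h
          · exact Or.inl h
          · simp only [List.mem_append, List.mem_cons] at h ⊢
            tauto)]
    · -- a genuine state k ≥ 1: the step inserts the reference entry for k
      have hk1 : 1 ≤ k := by omega
      set j : Nat := k.toNat - 1 with hj
      have hkj : k = (j : Int) + 1 := by omega
      have hkins : bEval z wd wd.keys memo k = memo.insert k (solnE z items k.toNat) := by
        rw [bEval, if_neg hkz]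
        have hEk : solnE z items k.toNat =
            (if PySem.Int.mod k z = 0 then (PySem.Int.floordiv k z, 0)
             else ((items.foldl (solnFB (solnTbl z items j) k) none).getD (-1, 0))) := by
          rw [show k.toNat = j + 1 by omega, solnE_succ, ← hkj]
        by_cases hmod : PySem.Int.mod k z = 0
        · rw [if_pos hmod, hEk, if_pos hmod]
        · rw [if_neg hmod]
          have hw1 : ∀ w ∈ wd.keys, 1 ≤ w := by
            rcases hsafe with h | h
            · exact h
            · exact absurd (solnModOne k z h) hmod
          have hmemo' : ∀ w ∈ wd.keys, 0 ≤ k - w →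
              memo.getD (k - w) (-1, 0) = solnE z items (k - w).toNat := by
            intro w hw hok
            have hkwN : k - w ∈ N := hclose k hkN hmod w hw hok
            have hkwlt : k - w < k := by have := hw1 w hw; omega
            have hkwP : k - w = 0 ∨ k - w ∈ P := by
              rcases hsplit _ hkwN with h | h
              · exact Or.inr h
              · rcases List.mem_cons.mp h with h | h
                · omega
                · exact absurd (hkrest _ h) (by omega)
            rw [hmemo (k - w), if_pos hkwP]
          rw [bEval_fold_eq wd hnd z items hitems memo k j hkj hmemo' hw1, hEk,
            if_neg hmod]
      rw [hkins]
      have := ih (P ++ [k]) hpair' hrestN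
        (by intro x hx
            rcases hsplit x hx with h | h
            · exact Or.inl (List.mem_append_left _ h)
            · rcases List.mem_cons.mp h with h | h
              · exact Or.inl (List.mem_append_right _ (by simp [h]))
              · exact Or.inr h)
        (by intro x hx yy hyy
            rcases List.mem_append.mp hx with h | h
            · exact lt_trans (horder x h k List.mem_cons_self) (hkrest yy hyy)
            · simp at h
              subst h
              exact hkrest yy hyy)
        (memo.insert k (solnE z items k.toNat))
        (by intro yy
            rw [PySem.Dict.getD_insert]
            by_cases hyk : yy = k
            · subst hyk
              rw [if_pos rfl, if_pos (Or.inr (List.mem_append_right _ (by simp)))]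
            · rw [if_neg hyk, hmemo yy]
              by_cases h1 : yy = 0 ∨ yy ∈ P
              · rw [if_pos h1, if_pos (by rcases h1 with h | h
                                          · exact Or.inl h
                                          · exact Or.inr (List.mem_append_left _ h))]
              · rw [if_neg h1, if_neg (by
                  rintro (h | h)
                  · exact h1 (Or.inl h)
                  · rcases List.mem_append.mp h with h | h
                    · exact h1 (Or.inr h)
                    · simp at h
                      exact hyk h)])
        y
      rw [this]
      by_cases h1 : y = 0 ∨ y ∈ (P ++ [k]) ++ rest
      · rw [if_pos h1, if_pos (by
          rcases h1 with h | h
          · exact Or.inl h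
          · simp only [List.mem_append, List.mem_cons] at h ⊢
            tauto)]
      · rw [if_neg h1, if_neg (by
          intro hcon
          apply h1
          rcases hcon with h | h
          · exact Or.inl h
          · simp only [List.mem_append, List.mem_cons] at h ⊢
            tauto)]

-- a fold of bEval over a list of zero states is the identity
lemma eval_zeros (z : Int) (wd : PySem.Dict Int (Int × Int)) (weights : List Int) :
    ∀ (l : List Int), (∀ x ∈ l, x = 0) → ∀ memo,
      l.foldl (bEval z wd weights) memo = memo := by
  intro l
  induction l with
  | nil => intro _ memo; rfl
  | cons k rest ih =>
    intro h memo
    rw [List.foldl_cons, bEval, if_pos (h k List.mem_cons_self)]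
    exact ih (fun x hx => h x (List.mem_cons_of_mem _ hx)) memo

-- ===== VERDICT (by name: the statement is the Claim_ definition above) =====
theorem solution_spec : Claim_unchanged_solution := by
  unfold Claim_unchanged_solution
  intro n z roads queries hdom hpre hD
  obtain ⟨hrows, hdisj, hneg⟩ := hpre
  have hq0 : ∀ q ∈ queries, 0 ≤ q := by
    intro q hq
    by_contra hcon
    exact hD ⟨q, hq, by omega⟩
  have hqb : ∀ q ∈ queries, q ≤ 2147483648 := by
    unfold Dom_solution at hdom
    simp only [Bool.and_eq_true, List.all_eq_true, pvDomInt, decide_eq_true_eq] at hdom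
    intro q hq
    exact (hdom.2 q hq).2
  simp only [solution, solution_alt]
  set wd := mkWDict roads with hwd
  have hnd : wd.keys.Nodup := mkWDict_nodup_keys roads
  set roots : PySem.Set Int := PySem.Set.ofList (queries.filter (fun c => decide (0 ≤ c)))
    with hroots
  have hrootsmem : ∀ x : Int, x ∈ roots ↔ x ∈ queries := by
    intro x
    rw [hroots, PySem.Set.mem_ofList, List.mem_filter]
    constructor
    · exact fun h => h.1
    · exact fun h => ⟨h, by simpa using hq0 x h⟩
  have hrootsnd : roots.Nodup := PySem.Set.nodup_ofList _
  have hroots0 : ∀ x ∈ roots, 0 ≤ x := fun x hx => hq0 x ((hrootsmem x).mp hx)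
  set m := PySem.List.maxD roots (fun x => x) 0 with hm
  have hm0 : 0 ≤ m := by
    rcases eq_or_ne roots ([] : List Int) with hnil | hne
    · rw [hm, hnil, PySem.List.maxD_nil]
    · exact hroots0 m (hm ▸ PySem.List.maxD_mem roots (fun x => x) 0 hne)
  have hrootsle : ∀ x ∈ roots, x ≤ m := by
    intro x hx
    exact hm ▸ PySem.List.le_maxD_id roots 0 x hx
  -- split on the two Pre_ branches
  rcases hdisj with ⟨hz, hwz⟩ | hqn
  · -- general branch: z ≠ 0 and safe weights
    set items := wd.items with hitems
    have hsafeI : (∀ p ∈ items, 1 ≤ p.1) ∨ z = 1 ∨ z = -1 := by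
      rcases hwz with hw | hone
      · exact Or.inl (mkWDict_keys_pos roads hw)
      · exact Or.inr hone
    have hsafeK : (∀ w ∈ wd.keys, 1 ≤ w) ∨ z = 1 ∨ z = -1 := by
      rcases hsafeI with h | h
      · refine Or.inl (fun w hw => ?_)
        obtain ⟨p, hp, hpw⟩ := List.mem_map.mp (show w ∈ wd.items.map Prod.fst from hw)
        exact hpw ▸ h p hp
      · exact Or.inr h
    -- discovery pass
    have hcinv0 : closureInv z wd.keys roots m := by
      intro x hx hmx _ _ _ _
      exact absurd (hrootsle x hx) (by omega)
    have hmcast : m = ((m.toNat : Nat) : Int) := by omega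
    obtain ⟨hNnd, hNsub, hN0, hNinv⟩ := by
      refine closure_go z wd.keys hsafeK m.toNat roots hrootsnd hroots0 ?_
      rw [← hmcast]
      exact hcinv0
    rw [← hmcast] at hNnd hNsub hN0 hNinv
    set N := (PySem.List.pyRange m 0 (-1)).foldl (bClosure z wd.keys) roots with hN
    have hclose : ∀ k ∈ N, PySem.Int.mod k z ≠ 0 → ∀ w ∈ wd.keys, 0 ≤ k - w → k - w ∈ N := by
      intro k hk hmod w hw hok
      have hk0 : 0 ≤ k := hN0 k hk
      rcases eq_or_lt_of_le hk0 with hk0' | hk0'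
      · exfalso
        apply hmod
        rw [← hk0']
        exact (PySem.Int.mod_eq_zero_iff_dvd 0 z).mpr (dvd_zero z)
      · exact hNinv k hk hk0' hmod w hw hok
    -- sorted needed states
    set s := PySem.List.sorted N (fun x => x) false with hs
    have hsperm : s.Perm N := PySem.List.sorted_perm N (fun x => x) false
    have hsmem : ∀ x : Int, x ∈ s ↔ x ∈ N := fun x => hsperm.mem_iff
    have hspair : s.Pairwise (· < ·) := by
      have h1 : s.Pairwise (fun a b : Int => a ≤ b) := PySem.List.sorted_pairwise N (fun x => x)
      have h2 : s.Nodup := hsperm.nodup_iff.mpr hNnd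
      exact (h1.and h2).imp (fun h => lt_of_le_of_ne h.1 h.2)
    -- evaluation pass
    have heval := eval_go z wd hnd items hitems hsafeK N hN0 hclose s []
      hspair (fun x hx => (hsmem x).mp hx)
      (fun x hx => Or.inr ((hsmem x).mpr hx)) (by intro x hx; cases hx)
      (PySem.Dict.empty.insert 0 (0, 0))
      (by intro y
          rw [PySem.Dict.getD_insert]
          by_cases hy : y = 0
          · subst hy
            rw [if_pos rfl, if_pos (Or.inl rfl)]
            rfl
          · rw [if_neg hy, if_neg (by rintro (h | h); exact hy h; cases h)]
            rfl)
    -- A's side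
    set M := (queries.foldl max 0).toNat with hM
    have hF := PySem.List.le_foldl_max queries 0
    have hMb : (M : Int) ≤ 2147483648 := by
      rcases PySem.List.foldl_max_mem queries 0 with hFm | hFm
      · omega
      · have := hqb _ hFm
        omega
    have hA := solnFoldQueries z wd items hitems hnd hz hsafeI M hMb queries
      (fun q hq => ⟨hq0 q hq, by have := hF.2 q hq; omega⟩) 0 (by omega) []
    rw [show (([0], [0], []) : List Int × List Int × List Int) =
        ((solnTbl z items 0).map Prod.fst, (solnTbl z items 0).map Prod.snd,
         ([] : List Int)) from rfl]
    rw [hA, List.nil_append]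
    -- per-query agreement
    refine List.map_congr_left (fun c hc => ?_)
    have hcN : c ∈ N := hNsub c ((hrootsmem c).mpr hc)
    have hcs : c ∈ s := (hsmem c).mpr hcN
    rw [heval c, if_pos (Or.inr (by simpa using hcs))]
  · -- all queries ≤ 0; with ¬D_ they are all 0
    have hq00 : ∀ q ∈ queries, q = 0 := by
      intro q hq
      have := hqn q hq
      have := hq0 q hq
      omega
    rw [solnFoldQueriesNonpos z wd queries hqn [], List.nil_append]
    have hmz : m = 0 := by
      rcases eq_or_ne roots ([] : List Int) with hnil | hne
      · rw [hm, hnil, PySem.List.maxD_nil]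
      · have hmem := PySem.List.maxD_mem roots (fun x => x) 0 hne
        exact hq00 m ((hrootsmem m).mp (hm ▸ hmem))
    rw [hmz, PySem.List.pyRange_neg_one_eq_nil (by omega), List.foldl_nil]
    have hszero : ∀ x ∈ PySem.List.sorted roots (fun x => x) false, x = 0 := by
      intro x hx
      have : x ∈ roots := (PySem.List.mem_sorted roots (fun x => x) false x).mp hx
      exact hq00 x ((hrootsmem x).mp this)
    rw [eval_zeros z wd wd.keys _ hszero]
    refine List.map_congr_left (fun c hc => ?_)
    have hc0 : c = 0 := hq00 c hc
    subst hc0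
    rfl

theorem solution_changed : Claim_changed_solution := by
  unfold Claim_changed_solution
  decide
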